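-- pv_equiv track=rewrite | github.com/oprimenyc/usefylr | app/modules/intake.py | _estimate_forms
-- ===== SOURCE A (Python) =====
-- from typing import Dict, List, Optional, Tuple
--
-- def _estimate_forms(flags: List[Dict]) -> List[str]:
--     """Estimate required tax forms based on complexity flags"""
--     forms = ['Schedule C']  # Always need Schedule C for sole proprietors
--
--     flag_triggers = [f['trigger'] for f in flags]
--
--     if 'has_employees' in flag_triggers or any(t in flag_triggers for t in ['employee', 'payroll']):
--         forms.extend(['Form 941', 'Form 940', 'W-2', 'W-3'])
--
--     if any(t in flag_triggers for t in ['foreign', 'international']):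
--         forms.extend(['FBAR', 'Form 8938'])
--
--     if 'cryptocurrency' in flag_triggers:
--         forms.append('Form 8949')
--
--     return forms
-- ===== SOURCE B (Python) =====
-- def _estimate_forms(flags):
--     """Estimate required tax forms based on complexity flags (inverted-index version)"""
--     blocks = [
--         ['Form 941', 'Form 940', 'W-2', 'W-3'],
--         ['FBAR', 'Form 8938'],
--         ['Form 8949'],
--     ]
--     trigger_to_block = {
--         'has_employees': 0, 'employee': 0, 'payroll': 0,
--         'foreign': 1, 'international': 1,
--         'cryptocurrency': 2,
--     }
--     fired = [False, False, False]
--     for f in flags: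
--         i = trigger_to_block.get(f['trigger'])
--         if i is not None:
--             fired[i] = True
--     forms = ['Schedule C']
--     for i, block in enumerate(blocks):
--         if fired[i]:
--             forms += block
--     return forms
-- ===== Notes on version B (the rewrite author's own statement) =====
-- stated objective: alternative
-- what changed: Inverts the control structure: instead of three branches each scanning the trigger list for its keywords, B makes a single pass over the flags, mapping each trigger through an inverted index (trigger -> block id) to set a fired bit, then emits the form blocks whose bit fired, in fixed order.
import Mathlib
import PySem

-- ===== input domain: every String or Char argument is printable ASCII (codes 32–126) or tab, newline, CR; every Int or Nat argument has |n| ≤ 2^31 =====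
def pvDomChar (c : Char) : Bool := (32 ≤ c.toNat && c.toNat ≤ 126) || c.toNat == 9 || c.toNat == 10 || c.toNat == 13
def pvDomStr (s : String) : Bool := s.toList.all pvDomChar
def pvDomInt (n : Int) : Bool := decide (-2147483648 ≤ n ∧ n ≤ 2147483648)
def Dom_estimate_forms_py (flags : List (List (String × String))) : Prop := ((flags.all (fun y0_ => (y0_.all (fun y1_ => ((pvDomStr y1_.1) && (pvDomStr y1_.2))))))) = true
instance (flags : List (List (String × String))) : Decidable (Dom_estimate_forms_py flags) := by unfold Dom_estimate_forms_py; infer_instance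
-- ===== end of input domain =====

-- B inverts A's control structure: one pass over the flags through a trigger->block index sets fired bits, then the blocks whose bit fired are emitted in order; return value only.
-- ===== PORT A =====
def estimate_forms_py (flags : List (List (String × String))) : List String :=
  let forms := ["Schedule C"]
  let flag_triggers := flags.filterMap (fun f => List.lookup "trigger" f)
  let forms := if flag_triggers.contains "has_employees" || ["employee", "payroll"].any (fun t => flag_triggers.contains t)
               then forms ++ ["Form 941", "Form 940", "W-2", "W-3"] else forms
  let forms := if ["foreign", "international"].any (fun t => flag_triggers.contains t)
               then forms ++ ["FBAR", "Form 8938"] else forms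
  let forms := if flag_triggers.contains "cryptocurrency" then forms ++ ["Form 8949"] else forms
  forms

-- ===== PORT B =====
-- the inverted index trigger -> block id (Python dict, literal keys; ported as assoc-list lookup = dict.get)
def pvTrigToBlock : List (String × Nat) :=
  [("has_employees", 0), ("employee", 0), ("payroll", 0), ("foreign", 1), ("international", 1), ("cryptocurrency", 2)]

def estimate_forms_py_alt (flags : List (List (String × String))) : List String :=
  let blocks : List (List String) := [["Form 941", "Form 940", "W-2", "W-3"], ["FBAR", "Form 8938"], ["Form 8949"]]
  -- for f in flags: i = trigger_to_block.get(f['trigger']); if i is not None: fired[i] = True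
  -- (f['trigger'] cannot raise under Pre_, so the loop body reads the lookup's value directly)
  let fired : List Bool := flags.foldl (fun fr f =>
      match (List.lookup "trigger" f).bind (fun t => List.lookup t pvTrigToBlock) with
      | some i => fr.set i true
      | none => fr) [false, false, false]
  (blocks.zipIdx).foldl (fun forms bi => if fired.getD bi.2 false then forms ++ bi.1 else forms) ["Schedule C"]

-- ===== PRECONDITION & SPEC =====
-- Pre_ excludes exactly the inputs where A raises KeyError: a flag dict without a 'trigger' key.
def Pre_estimate_forms_py (flags : List (List (String × String))) : Prop :=
  ∀ f ∈ flags, (List.lookup "trigger" f).isSome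

instance (flags : List (List (String × String))) : Decidable (Pre_estimate_forms_py flags) := by
  unfold Pre_estimate_forms_py; infer_instance

def pvWitness_estimate_forms_py : (List (List (String × String))) := [[("trigger", "payroll")], [("trigger", "cryptocurrency")]]

def Spec_estimate_forms_py (flags : List (List (String × String))) (out : List String) : Prop := out = estimate_forms_py_alt flags
instance (flags : List (List (String × String))) (out : List String) : Decidable (Spec_estimate_forms_py flags out) := by unfold Spec_estimate_forms_py; infer_instance

-- ===== CLAIM =====
def Claim_equal_estimate_forms_py : Prop := ∀ (flags : List (List (String × String))), Dom_estimate_forms_py flags → Pre_estimate_forms_py flags → Spec_estimate_forms_py flags (estimate_forms_py flags)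

-- ===== LEMMAS AND PROOFS =====

-- characterisation of B's fired-bit fold over the trigger list: each bit is
-- "initial bit OR some trigger maps to this block"
theorem fired_fold_char (l : List String) (a b c : Bool) :
    l.foldl (fun fr t =>
      match List.lookup t pvTrigToBlock with
      | some i => fr.set i true
      | none => fr) [a, b, c] =
    [a || l.any (fun t => List.lookup t pvTrigToBlock == some 0),
     b || l.any (fun t => List.lookup t pvTrigToBlock == some 1),
     c || l.any (fun t => List.lookup t pvTrigToBlock == some 2)] := by
  induction l generalizing a b c with
  | nil => simp
  | cons h t ih =>
    simp only [List.foldl_cons, List.any_cons]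
    rcases hb : List.lookup h pvTrigToBlock with _ | i
    · simp [ih]
    · have : i = 0 ∨ i = 1 ∨ i = 2 := by
        simp only [pvTrigToBlock, List.lookup] at hb
        repeat' split at hb <;> simp_all
      rcases this with rfl | rfl | rfl <;>
        simp [List.set, ih, Bool.or_comm, Bool.or_left_comm]

-- under Pre_ every flag dict has a 'trigger' key, so B's fold over flags equals
-- the same fold over the extracted trigger list
theorem fold_fired_of_pre (flags : List (List (String × String))) (fr0 : List Bool)
    (h : ∀ f ∈ flags, (List.lookup "trigger" f).isSome) :
    flags.foldl (fun fr f =>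
      match (List.lookup "trigger" f).bind (fun t => List.lookup t pvTrigToBlock) with
      | some i => fr.set i true
      | none => fr) fr0 =
    (flags.filterMap (fun f => List.lookup "trigger" f)).foldl (fun fr t =>
      match List.lookup t pvTrigToBlock with
      | some i => fr.set i true
      | none => fr) fr0 := by
  induction flags generalizing fr0 with
  | nil => simp
  | cons f fs ih =>
    obtain ⟨s, hs⟩ := Option.isSome_iff_exists.mp (h f (by simp))
    simp only [List.foldl_cons, List.filterMap_cons, hs, Option.bind_some]
    exact ih _ (fun g hg => h g (by simp [hg]))

-- reading the fired bits back as A's membership tests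
theorem lk0 (t : String) : (List.lookup t pvTrigToBlock == some 0) =
    (t == "has_employees" || t == "employee" || t == "payroll") := by
  simp only [pvTrigToBlock, List.lookup]
  repeat' split <;> simp_all

theorem lk1 (t : String) : (List.lookup t pvTrigToBlock == some 1) =
    (t == "foreign" || t == "international") := by
  simp only [pvTrigToBlock, List.lookup]
  repeat' split <;> simp_all

theorem lk2 (t : String) : (List.lookup t pvTrigToBlock == some 2) =
    (t == "cryptocurrency") := by
  simp only [pvTrigToBlock, List.lookup]
  repeat' split <;> simp_all

theorem any_lk0 (l : List String) : l.any (fun t => List.lookup t pvTrigToBlock == some 0)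
    = (l.contains "has_employees" || l.contains "employee" || l.contains "payroll") := by
  rw [Bool.eq_iff_iff]
  simp [List.any_eq_true, lk0]
  aesop

theorem any_lk1 (l : List String) : l.any (fun t => List.lookup t pvTrigToBlock == some 1)
    = (l.contains "foreign" || l.contains "international") := by
  rw [Bool.eq_iff_iff]
  simp [List.any_eq_true, lk1]
  aesop

theorem any_lk2 (l : List String) : l.any (fun t => List.lookup t pvTrigToBlock == some 2)
    = l.contains "cryptocurrency" := by
  rw [Bool.eq_iff_iff]
  simp [List.any_eq_true, lk2]

-- ===== VERDICT =====
theorem estimate_forms_py_spec : Claim_equal_estimate_forms_py := by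
  intro flags _ hpre
  unfold Spec_estimate_forms_py estimate_forms_py estimate_forms_py_alt
  rw [fold_fired_of_pre _ _ hpre, fired_fold_char, any_lk0, any_lk1, any_lk2]
  simp only [List.zipIdx, List.foldl, List.getD, List.getElem?_cons_zero,
    List.getElem?_cons_succ, Option.getD_some, Bool.false_or]
  simp [Bool.or_assoc]
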